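-- pv_equiv track=rewrite | github.com/OhJeMIN/algorithm | Programmers/코딩테스트 입문/겹치는 선분의 길이/MunSeoHee.py | solution
-- ===== SOURCE A (Python) =====
-- def solution(lines):
--     line = [0]*200
--     for target in lines :
--         for dot in range(target[0], target[1]) :
--             line[dot+100] += 1
--
--     answer = 0
--     for value in line :
--         if value >= 2 :
--             answer += 1
--     return answer
-- ===== SOURCE B (Python) =====
-- def solution(lines):
--     # difference array over the 201 boundary positions, then one prefix-sum sweep
--     diff = [0] * 201
--     for t in lines:
--         if t[0] < t[1]:
--             diff[t[0] + 100] += 1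
--             diff[t[1] + 100] -= 1
--     total = 0
--     cov = 0
--     for d in diff[:200]:
--         cov += d
--         if cov >= 2:
--             total += 1
--     return total
-- ===== Notes on version B (the rewrite author's own statement) =====
-- stated objective: alternative
-- what changed: Replaces per-unit marking of every covered cell (inner loop over range(start,end) into a 200-cell array) by a difference array updated once per line plus a single prefix-sum sweep that counts cells with coverage >= 2; same measured cost on the generated inputs.
-- outside the precondition, e.g. on solution([[-150, -140], [50, 60]]): A returns 10, B returns 9
import Mathlib
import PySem

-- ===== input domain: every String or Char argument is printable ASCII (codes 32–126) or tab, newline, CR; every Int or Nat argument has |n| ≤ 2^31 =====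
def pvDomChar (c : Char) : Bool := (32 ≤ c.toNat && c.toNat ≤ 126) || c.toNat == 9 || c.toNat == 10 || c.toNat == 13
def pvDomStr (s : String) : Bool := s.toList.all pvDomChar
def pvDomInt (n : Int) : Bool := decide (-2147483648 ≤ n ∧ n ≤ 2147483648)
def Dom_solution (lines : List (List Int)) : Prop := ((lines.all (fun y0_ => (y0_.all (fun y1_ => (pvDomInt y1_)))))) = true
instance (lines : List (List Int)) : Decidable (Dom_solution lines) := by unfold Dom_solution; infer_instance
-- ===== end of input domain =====

-- B replaces the per-unit-cell marking loop by a difference array plus one prefix-sum sweep (alternative decomposition, same measured cost).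

-- ===== PORT A =====
-- line[dot+100] += 1
def markCell (line : List Int) (dot : Int) : List Int :=
  PySem.List.pySetD line (dot + 100) (PySem.List.pyGetD line (dot + 100) 0 + 1)

-- for dot in range(target[0], target[1]): line[dot+100] += 1
def markLine (line : List Int) (target : List Int) : List Int :=
  (PySem.List.pyRange (PySem.List.pyGetD target 0 0) (PySem.List.pyGetD target 1 0) 1).foldl
    markCell line

def solution (lines : List (List Int)) : Int :=
  let line := lines.foldl markLine (List.replicate 200 0)
  line.foldl (fun answer value => if value ≥ 2 then answer + 1 else answer) 0

-- ===== PORT B =====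
-- if t[0] < t[1]: diff[t[0]+100] += 1; diff[t[1]+100] -= 1
def diffAdd (diff : List Int) (t : List Int) : List Int :=
  let a := PySem.List.pyGetD t 0 0
  let b := PySem.List.pyGetD t 1 0
  if a < b then
    let d1 := PySem.List.pySetD diff (a + 100) (PySem.List.pyGetD diff (a + 100) 0 + 1)
    PySem.List.pySetD d1 (b + 100) (PySem.List.pyGetD d1 (b + 100) 0 - 1)
  else diff

-- cov += d; if cov >= 2: total += 1   (state = (total, cov))
def sweepStep (p : Int × Int) (d : Int) : Int × Int :=
  let cov := p.2 + d
  (if cov ≥ 2 then p.1 + 1 else p.1, cov)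

def solution_alt (lines : List (List Int)) : Int :=
  let diff := lines.foldl diffAdd (List.replicate 201 0)
  ((PySem.List.slice diff none (some (200 : Int))).foldl sweepStep (0, 0)).1

-- ===== PRECONDITION & SPEC =====
-- Pre_ admits every line with both endpoints present and, when the segment is nonempty
-- (start < end), both endpoints inside the problem's documented grid [-100, 100]; outside
-- it A either raises IndexError or silently wraps negative indices (Python list wraparound),
-- which Pre_ excludes (see claim cites).
def Pre_solution (lines : List (List Int)) : Prop :=
  ∀ t ∈ lines, 2 ≤ t.length ∧
    (PySem.List.pyGetD t 1 0 ≤ PySem.List.pyGetD t 0 0 ∨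
     (-100 ≤ PySem.List.pyGetD t 0 0 ∧ PySem.List.pyGetD t 1 0 ≤ 100))
instance (lines : List (List Int)) : Decidable (Pre_solution lines) := by
  unfold Pre_solution; infer_instance

def pvWitness_solution : List (List Int) := [[-5, 3], [0, 10], [7, 7], [30, 20]]

def Spec_solution (lines : List (List Int)) (out : Int) : Prop := out = solution_alt lines
instance (lines : List (List Int)) (out : Int) : Decidable (Spec_solution lines out) := by
  unfold Spec_solution; infer_instance

-- ===== CLAIM (what is proved, stated in full; the proofs are below) =====
def Claim_equal_solution : Prop :=
  ∀ (lines : List (List Int)), Dom_solution lines → Pre_solution lines →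
    Spec_solution lines (solution lines)

-- ===== LEMMAS AND PROOFS =====

-- invariant: the cell array is the prefix-sum of the difference array
def CovRel (L D : List Int) : Prop :=
  L.length = 200 ∧ D.length = 201 ∧
    ∀ i : Nat, i < 200 → L.getD i 0 = ((D.take (i + 1)).sum : Int)

lemma covrel_init : CovRel (List.replicate 200 0) (List.replicate 201 0) := by
  refine ⟨List.length_replicate, List.length_replicate, fun i hi => ?_⟩
  rw [List.take_replicate, List.getD_eq_getElem _ _ (by rw [List.length_replicate]; exact hi),
    List.getElem_replicate, List.sum_replicate, smul_zero]

lemma sum_take_set (D : List Int) (j : Nat) (v : Int) (k : Nat) (hj : j < D.length) :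
    ((D.set j v).take k).sum = (D.take k).sum + (if j < k then v - D.getD j 0 else 0) := by
  induction D generalizing j k with
  | nil => simp at hj
  | cons d D ih =>
    cases j with
    | zero =>
      cases k with
      | zero => simp
      | succ k => simp [List.set_cons_zero]; ring
    | succ j =>
      cases k with
      | zero => simp
      | succ k =>
        simp only [List.set_cons_succ, List.take_succ_cons, List.sum_cons]
        rw [ih j k (by simpa using hj)]
        simp only [List.getD_cons_succ]
        split_ifs with h1 h2 h2 <;> omega

lemma mark_fold (n : Nat) : ∀ (a b : Int), (b - a).toNat = n → -100 ≤ a → b ≤ 100 →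
    ∀ L : List Int, L.length = 200 →
      ((PySem.List.pyRange a b 1).foldl markCell L).length = 200 ∧
      ∀ i : Nat, i < 200 →
        ((PySem.List.pyRange a b 1).foldl markCell L).getD i 0 =
          L.getD i 0 + (if a + 100 ≤ (i : Int) ∧ (i : Int) < b + 100 then 1 else 0) := by
  induction n with
  | zero =>
    intro a b hn ha hb L hL
    have hba : b ≤ a := by omega
    have : PySem.List.pyRange a b 1 = [] := by
      rw [PySem.List.pyRange_one]; simp [hn]
    rw [this]
    refine ⟨hL, fun i hi => ?_⟩
    have : ¬ (a + 100 ≤ (i : Int) ∧ (i : Int) < b + 100) := by omega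
    simp [this]
  | succ n ih =>
    intro a b hn ha hb L hL
    have hab : a < b := by omega
    rw [PySem.List.pyRange_one_cons hab]
    simp only [List.foldl_cons]
    have h0 : (0 : Int) ≤ a + 100 := by omega
    have h1 : a + 100 < (L.length : Int) := by rw [hL]; omega
    have hset : markCell L a = L.set (a + 100).toNat (L[(a + 100).toNat] + 1) := by
      unfold markCell
      rw [PySem.List.pyGetD_eq_getElem L 0 h0 h1, PySem.List.pySetD_of_nonneg L _ h0]
    have hlen1 : (markCell L a).length = 200 := by rw [hset]; simpa using hL
    obtain ⟨hlen, hget⟩ := ih (a + 1) b (by omega) (by omega) hb (markCell L a) hlen1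
    refine ⟨hlen, fun i hi => ?_⟩
    rw [hget i hi, hset]
    have hjlt : (a + 100).toNat < L.length := by omega
    have hgd : ∀ m : Nat, m < 200 →
        (L.set (a + 100).toNat (L[(a + 100).toNat] + 1)).getD m 0 =
          L.getD m 0 + (if (a + 100).toNat = m then 1 else 0) := by
      intro m hm
      have hm' : m < L.length := by omega
      rw [List.getD_eq_getElem _ _ (by simpa using hm'), List.getElem_set,
        List.getD_eq_getElem _ _ hm']
      split_ifs with h
      · subst h; omega
      · omega
    rw [hgd i hi]
    have : ((a + 100).toNat : Int) = a + 100 := by omega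
    split_ifs <;> omega

lemma diffAdd_sum (D t : List Int)
    (hpre : 2 ≤ t.length ∧
      (PySem.List.pyGetD t 1 0 ≤ PySem.List.pyGetD t 0 0 ∨
       (-100 ≤ PySem.List.pyGetD t 0 0 ∧ PySem.List.pyGetD t 1 0 ≤ 100)))
    (hD : D.length = 201) :
    (diffAdd D t).length = 201 ∧
    ∀ i : Nat, i < 200 →
      ((diffAdd D t).take (i + 1)).sum = (D.take (i + 1)).sum +
        (if PySem.List.pyGetD t 0 0 + 100 ≤ (i : Int) ∧
            (i : Int) < PySem.List.pyGetD t 1 0 + 100 then 1 else 0) := by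
  set a := PySem.List.pyGetD t 0 0 with hadef
  set b := PySem.List.pyGetD t 1 0 with hbdef
  by_cases hab : a < b
  · have hbnd : -100 ≤ a ∧ b ≤ 100 := hpre.2.resolve_left (by omega)
    have ha0 : (0 : Int) ≤ a + 100 := by omega
    have hb0 : (0 : Int) ≤ b + 100 := by omega
    have haL : (a + 100).toNat < D.length := by omega
    have hbL : (b + 100).toNat < D.length := by omega
    have hgetA : PySem.List.pyGetD D (a + 100) 0 = D.getD (a + 100).toNat 0 := by
      rw [PySem.List.pyGetD_eq_getElem D 0 ha0 (by omega), List.getD_eq_getElem _ _ haL]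
    set d1 := D.set (a + 100).toNat (D.getD (a + 100).toNat 0 + 1) with hd1
    have hstep1 : PySem.List.pySetD D (a + 100) (PySem.List.pyGetD D (a + 100) 0 + 1) = d1 := by
      rw [PySem.List.pySetD_of_nonneg D _ ha0, hgetA]
    have hd1len : d1.length = D.length := by rw [hd1, List.length_set]
    have hgetB : PySem.List.pyGetD d1 (b + 100) 0 = d1.getD (b + 100).toNat 0 := by
      rw [PySem.List.pyGetD_eq_getElem d1 0 hb0 (by rw [hd1len]; omega),
        List.getD_eq_getElem _ _ (by rw [hd1len]; omega)]
    have hunf : diffAdd D t = d1.set (b + 100).toNat (d1.getD (b + 100).toNat 0 - 1) := by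
      simp only [diffAdd]
      rw [← hadef, ← hbdef, if_pos hab, hstep1, hgetB, PySem.List.pySetD_of_nonneg d1 _ hb0]
    refine ⟨by rw [hunf, List.length_set, hd1len, hD], fun i hi => ?_⟩
    rw [hunf, sum_take_set _ _ _ _ (by rw [hd1len]; omega), hd1,
      sum_take_set _ _ _ _ haL]
    have h1 : ((a + 100).toNat : Int) = a + 100 := by omega
    have h2 : ((b + 100).toNat : Int) = b + 100 := by omega
    split_ifs <;> omega
  · have heq : diffAdd D t = D := by
      simp only [diffAdd]
      rw [← hadef, ← hbdef, if_neg hab]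
    rw [heq]
    refine ⟨hD, fun i hi => ?_⟩
    have hno : ¬ (a + 100 ≤ (i : Int) ∧ (i : Int) < b + 100) := by omega
    rw [if_neg hno, add_zero]

lemma fold_covrel (lines : List (List Int)) : ∀ (L D : List Int),
    (∀ t ∈ lines, 2 ≤ t.length ∧
      (PySem.List.pyGetD t 1 0 ≤ PySem.List.pyGetD t 0 0 ∨
       (-100 ≤ PySem.List.pyGetD t 0 0 ∧ PySem.List.pyGetD t 1 0 ≤ 100))) →
    CovRel L D → CovRel (lines.foldl markLine L) (lines.foldl diffAdd D) := by
  induction lines with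
  | nil => intro L D _ h; simpa using h
  | cons t lines ih =>
    intro L D hpre hrelLD
    obtain ⟨hL, hD, hrel⟩ := hrelLD
    simp only [List.foldl_cons]
    have hpt := hpre t (by simp)
    apply ih _ _ (fun u hu => hpre u (by simp [hu]))
    by_cases hab : PySem.List.pyGetD t 0 0 < PySem.List.pyGetD t 1 0
    · have hbnd : -100 ≤ PySem.List.pyGetD t 0 0 ∧ PySem.List.pyGetD t 1 0 ≤ 100 := by
        exact hpt.2.resolve_left (by omega)
      obtain ⟨hmlen, hmget⟩ := mark_fold (PySem.List.pyGetD t 1 0 - PySem.List.pyGetD t 0 0).toNat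
        _ _ rfl hbnd.1 hbnd.2 L hL
      obtain ⟨hdlen, hdsum⟩ := diffAdd_sum D t hpt hD
      refine ⟨hmlen, hdlen, fun i hi => ?_⟩
      show (List.foldl markCell L (PySem.List.pyRange (PySem.List.pyGetD t 0 0)
        (PySem.List.pyGetD t 1 0) 1)).getD i 0 = _
      rw [hmget i hi, hdsum i hi, hrel i hi]
    · have hrange : PySem.List.pyRange (PySem.List.pyGetD t 0 0) (PySem.List.pyGetD t 1 0) 1 = [] := by
        rw [PySem.List.pyRange_one]
        simp [Int.toNat_eq_zero.mpr (by omega : PySem.List.pyGetD t 1 0 - PySem.List.pyGetD t 0 0 ≤ 0)]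
      have hm : markLine L t = L := by unfold markLine; rw [hrange]; rfl
      have hd0 : diffAdd D t = D := by simp only [diffAdd]; rw [if_neg hab]
      rw [hm, hd0]; exact ⟨hL, hD, hrel⟩

lemma sweep_count (ds : List Int) : ∀ (L : List Int) (tot c : Int),
    L.length = ds.length →
    (∀ i : Nat, i < ds.length → L.getD i 0 = c + (ds.take (i + 1)).sum) →
    (ds.foldl sweepStep (tot, c)).1 =
      L.foldl (fun answer value => if value ≥ 2 then answer + 1 else answer) tot := by
  induction ds with
  | nil =>
    intro L tot c hlen _
    rw [List.eq_nil_of_length_eq_zero hlen]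
    rfl
  | cons d ds ih =>
    intro L tot c hlen hget
    cases L with
    | nil => simp at hlen
    | cons v L =>
      have hv : v = c + d := by simpa using hget 0 (by simp)
      have hL' : L.length = ds.length := by simpa using hlen
      have hget' : ∀ i : Nat, i < ds.length → L.getD i 0 = (c + d) + (ds.take (i + 1)).sum := by
        intro i hi
        have h2 := hget (i + 1) (by simpa using Nat.succ_lt_succ hi)
        simpa [add_assoc] using h2
      rw [List.foldl_cons, List.foldl_cons, hv]
      exact ih L (if c + d ≥ 2 then tot + 1 else tot) (c + d) hL' hget'

-- ===== VERDICT (by name: the statement is the Claim_ definition above) =====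
theorem solution_spec : Claim_equal_solution := by
  intro lines _ hpre
  unfold Spec_solution
  simp only [solution, solution_alt]
  obtain ⟨hL, hD, hrel⟩ := fold_covrel lines _ _ hpre covrel_init
  set L := lines.foldl markLine (List.replicate 200 0) with hLdef
  set D := lines.foldl diffAdd (List.replicate 201 0) with hDdef
  rw [PySem.List.slice_to D (by norm_num)]
  have h200 : (200 : Int).toNat = 200 := rfl
  rw [h200]
  have hlen : L.length = (D.take 200).length := by rw [List.length_take, hL, hD]; omega
  have hget : ∀ i : Nat, i < (D.take 200).length →
      L.getD i 0 = 0 + (((D.take 200).take (i + 1)).sum : Int) := by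
    intro i hi
    have hi' : i < 200 := by rw [List.length_take, hD] at hi; omega
    rw [List.take_take, min_eq_left (by omega : i + 1 ≤ 200), hrel i hi', zero_add]
  exact (sweep_count (D.take 200) L 0 0 hlen hget).symm
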